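-- pv_equiv track=rewrite | github.com/angryPodo/TIL | Python/problem3.py | datacat2
-- ===== SOURCE A (Python) =====
-- Num_to_Eng = {1: 'one', 2: 'two', 3: 'three', 4: 'four', 5: 'five'}
--
-- def datacat2(strList):
--     lengthcount = {}
--     for word in strList:
--         length = len(word)
--         if length in lengthcount:
--             lengthcount[length] += 1
--         else:
--             lengthcount[length] = 1
--     result_dict = {k: Num_to_Eng[v] for k, v in lengthcount.items()}
--     return result_dict
-- ===== SOURCE B (Python) =====
-- Num_to_Eng = {1: 'one', 2: 'two', 3: 'three', 4: 'four', 5: 'five'}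
--
-- def datacat2(strList):
--     # Sort the word lengths, then run-length-scan the sorted list once to get
--     # each length's multiplicity, then map every word's length through the table.
--     lengths = sorted(len(w) for w in strList)
--     counts = {}
--     prev = 0
--     run = 0
--     for L in lengths:
--         if run and L == prev:
--             run += 1
--         else:
--             if run:
--                 counts[prev] = run
--             prev = L
--             run = 1
--     if run:
--         counts[prev] = run
--     return {len(w): Num_to_Eng[counts[len(w)]] for w in strList}
-- ===== Notes on version B (the rewrite author's own statement) =====
-- stated objective: alternative
-- what changed: Replaces A's hash-counting loop with sort-the-lengths plus a single run-length scan over the sorted list, then builds the result by mapping each word's length through the run-count table.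
import Mathlib
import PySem

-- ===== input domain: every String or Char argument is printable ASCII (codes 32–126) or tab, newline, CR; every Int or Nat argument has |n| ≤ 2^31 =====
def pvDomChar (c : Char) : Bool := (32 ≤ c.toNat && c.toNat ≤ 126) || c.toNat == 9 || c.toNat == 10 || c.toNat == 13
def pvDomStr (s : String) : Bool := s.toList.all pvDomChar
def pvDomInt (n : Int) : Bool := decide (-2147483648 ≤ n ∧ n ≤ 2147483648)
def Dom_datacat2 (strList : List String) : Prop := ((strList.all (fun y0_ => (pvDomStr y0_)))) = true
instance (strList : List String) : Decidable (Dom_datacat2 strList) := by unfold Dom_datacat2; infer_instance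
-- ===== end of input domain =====

-- B replaces A's hash-counting loop by sorting the word lengths and run-length-scanning
-- the sorted list once (alternative algorithm); return value only.

-- ===== PORT A =====
-- Num_to_Eng = {1: 'one', 2: 'two', 3: 'three', 4: 'four', 5: 'five'}
def numToEng : PySem.Dict Int String :=
  PySem.Dict.ofList [(1, "one"), (2, "two"), (3, "three"), (4, "four"), (5, "five")]

-- Num_to_Eng[v] raises KeyError when v ∉ {1..5}; Pre_datacat2 excludes exactly those inputs, the port uses getD ""
def datacat2 (strList : List String) : List (Int × String) :=
  (strList.foldl (fun d word =>
    let length : Int := PySem.Str.len word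
    if d.contains length then d.insert length (d.getD length 0 + 1)
    else d.insert length 1) (PySem.Dict.empty : PySem.Dict Int Int)).items.map
      (fun kv => (kv.1, numToEng.getD kv.2 ""))

-- ===== PORT B =====
-- B: sort the word lengths, then one run-length pass over the sorted list with state
-- (counts, prev, run) and a final flush, then the result comprehension over the words.
-- 'counts[len(w)]' never raises (len(w) is always a key of counts);
-- 'Num_to_Eng[counts[len(w)]]' raises KeyError exactly where A's lookup does (excluded
-- by Pre_datacat2), so the port uses getD "" like A's port.
def datacat2_alt (strList : List String) : List (Int × String) :=
  let lengths := PySem.List.sorted (strList.map (fun w => PySem.Str.len w)) (fun x => x) false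
  let st := lengths.foldl (fun st L =>
      if st.2.2 ≠ 0 ∧ L = st.2.1 then (st.1, st.2.1, st.2.2 + 1)
      else ((if st.2.2 ≠ 0 then st.1.insert st.2.1 st.2.2 else st.1), L, (1 : Int)))
    ((PySem.Dict.empty : PySem.Dict Int Int), (0 : Int), (0 : Int))
  let counts := if st.2.2 ≠ 0 then st.1.insert st.2.1 st.2.2 else st.1
  (strList.foldl (fun d w =>
      d.insert (PySem.Str.len w)
        (numToEng.getD (counts.getD (PySem.Str.len w) 0) ""))
    (PySem.Dict.empty : PySem.Dict Int String)).items

-- ===== PRECONDITION & SPEC =====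
-- Pre_ excludes inputs where some word length occurs more than 5 times: there Num_to_Eng[count] raises KeyError in both A and B.
def Pre_datacat2 (strList : List String) : Prop :=
  ∀ w ∈ strList, (strList.map (fun v => PySem.Str.len v)).count (PySem.Str.len w) ≤ 5
instance (strList : List String) : Decidable (Pre_datacat2 strList) := by unfold Pre_datacat2; infer_instance
def pvWitness_datacat2 : List String := ["a", "bb", "cc", ""]

def Spec_datacat2 (strList : List String) (out : List (Int × String)) : Prop := out = datacat2_alt strList
instance (strList : List String) (out : List (Int × String)) : Decidable (Spec_datacat2 strList out) := by unfold Spec_datacat2; infer_instance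

-- ===== CLAIM (what is proved, stated in full; the proofs are below) =====
def Claim_equal_datacat2 : Prop := ∀ (strList : List String), Dom_datacat2 strList → Pre_datacat2 strList → Spec_datacat2 strList (datacat2 strList)

-- ===== LEMMAS AND PROOFS =====

-- proof-side names for B's loop body and final flush (definitionally the lambdas of the port)
def pvStep (st : PySem.Dict Int Int × Int × Int) (L : Int) : PySem.Dict Int Int × Int × Int :=
  if st.2.2 ≠ 0 ∧ L = st.2.1 then (st.1, st.2.1, st.2.2 + 1)
  else ((if st.2.2 ≠ 0 then st.1.insert st.2.1 st.2.2 else st.1), L, (1 : Int))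

def pvFlush (st : PySem.Dict Int Int × Int × Int) : PySem.Dict Int Int :=
  if st.2.2 ≠ 0 then st.1.insert st.2.1 st.2.2 else st.1

-- A's loop over the words is the Counter of the length list.
theorem datacat2_fold_eq_counter (strList : List String) :
    (strList.foldl (fun d word =>
      let length : Int := PySem.Str.len word
      if d.contains length then d.insert length (d.getD length 0 + 1)
      else d.insert length 1) PySem.Dict.empty)
    = PySem.Dict.counter (strList.map (fun w => PySem.Str.len w)) := by
  rw [← PySem.Dict.foldl_insert_getD_add_one_eq_counter, List.foldl_map]
  apply PySem.List.foldl_congr_mem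
  intro d w _
  show (if d.contains (PySem.Str.len w) = true
      then d.insert (PySem.Str.len w) (d.getD (PySem.Str.len w) 0 + 1)
      else d.insert (PySem.Str.len w) 1)
    = d.insert (PySem.Str.len w) (d.getD (PySem.Str.len w) 0 + 1)
  split_ifs with h
  · rfl
  · rw [PySem.Dict.getD_of_not_contains d 0 (by simpa using h)]
    norm_num

-- invariant of B's run-length scan: on a sorted list, after the final flush every
-- lookup is the count of that value (states with run r at value p, finished counts c)
theorem run_scan_getD (s : List Int) (hs : s.Pairwise (· ≤ ·)) :
    ∀ (c : PySem.Dict Int Int) (p r : Int), 0 ≤ r → (∀ x ∈ s, p ≤ x) → ∀ L : Int,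
    (pvFlush (s.foldl pvStep (c, p, r))).getD L 0
    = if r ≠ 0 ∧ L = p then r + (s.count L : Int)
      else if L ∈ s then (s.count L : Int) else c.getD L 0 := by
  induction s with
  | nil =>
    intro c p r hr hp L
    simp only [List.foldl_nil, pvFlush]
    by_cases hr0 : r = 0
    · simp [hr0]
    · by_cases hLp : L = p
      · subst hLp
        rw [if_pos hr0, PySem.Dict.getD_insert_self, if_pos ⟨hr0, rfl⟩]
        simp
      · rw [if_pos hr0, PySem.Dict.getD_insert_of_ne _ _ _ hLp,
            if_neg (show ¬(r ≠ 0 ∧ L = p) from fun h => hLp h.2)]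
        simp
  | cons x t ih =>
    intro c p r hr hp L
    have hpx : p ≤ x := hp x (List.mem_cons_self ..)
    have hxt : ∀ y ∈ t, x ≤ y := (List.pairwise_cons.mp hs).1
    have hst : t.Pairwise (· ≤ ·) := (List.pairwise_cons.mp hs).2
    rw [List.foldl_cons]
    by_cases hcase : r ≠ 0 ∧ x = p
    · rw [show pvStep (c, p, r) x = (c, p, r + 1) from by simp [pvStep, hcase]]
      rw [ih hst c p (r + 1) (by omega) (fun y hy => hcase.2 ▸ hxt y hy) L]
      by_cases hLp : L = p
      · rw [if_pos ⟨show r + 1 ≠ 0 by omega, hLp⟩, if_pos ⟨hcase.1, hLp⟩]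
        have hLx : L = x := by rw [hLp, hcase.2]
        subst hLx
        rw [List.count_cons_self]
        push_cast; ring
      · rw [if_neg (show ¬(r + 1 ≠ 0 ∧ L = p) from fun h => hLp h.2),
            if_neg (show ¬(r ≠ 0 ∧ L = p) from fun h => hLp h.2)]
        have hLx : L ≠ x := fun h => hLp (by rw [h, hcase.2])
        rw [List.count_cons_of_ne hLx.symm]
        by_cases hLt : L ∈ t
        · rw [if_pos hLt, if_pos (List.mem_cons_of_mem _ hLt)]
        · rw [if_neg hLt, if_neg (show L ∉ x :: t by simp [hLx, hLt])]
    · rw [show pvStep (c, p, r) x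
          = ((if r ≠ 0 then c.insert p r else c), x, (1 : Int)) from by
            simp only [pvStep]; rw [if_neg hcase]]
      rw [ih hst _ x 1 (by omega) hxt L]
      by_cases hLx : L = x
      · subst hLx
        rw [if_pos ⟨one_ne_zero, rfl⟩,
            if_neg (show ¬(r ≠ 0 ∧ L = p) from fun h => hcase ⟨h.1, h.2⟩),
            if_pos (List.mem_cons_self ..), List.count_cons_self]
        push_cast; ring
      · by_cases hLp : r ≠ 0 ∧ L = p
        · have hpx' : p < x := lt_of_le_of_ne hpx (fun h => hcase ⟨hLp.1, h.symm⟩)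
          have hLt : L ∉ t := fun hmem => absurd (hxt L hmem) (by rw [hLp.2]; omega)
          have hc0 : List.count L (x :: t) = 0 := by
            rw [List.count_eq_zero]; simp [hLx, hLt]
          rw [if_neg (show ¬((1 : Int) ≠ 0 ∧ L = x) from fun h => hLx h.2),
              if_neg hLt, if_pos hLp, hc0,
              if_pos hLp.1, hLp.2, PySem.Dict.getD_insert_self]
          push_cast; ring
        · rw [if_neg (show ¬((1 : Int) ≠ 0 ∧ L = x) from fun h => hLx h.2),
              if_neg hLp, List.count_cons_of_ne (show x ≠ L from fun h => hLx h.symm)]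
          by_cases hLt : L ∈ t
          · rw [if_pos hLt, if_pos (show L ∈ x :: t from List.mem_cons_of_mem _ hLt)]
          · rw [if_neg hLt, if_neg (show L ∉ x :: t by simp [hLx, hLt])]
            by_cases hr0 : r = 0
            · rw [if_neg (show ¬ r ≠ 0 from fun h => h hr0)]
            · rw [if_pos hr0,
                  PySem.Dict.getD_insert_of_ne _ _ _ (show L ≠ p from fun h => hLp ⟨hr0, h⟩)]

-- a fold inserting key k with value f k over ks turns the dict's items into
-- the ordered dedup of the keys mapped through (fun k => (k, f k))
theorem items_foldl_insert_fun (f : Int → String) :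
    ∀ (ks : List Int) (S : List Int),
    (ks.foldl (fun d k => d.insert k (f k))
      (PySem.Dict.mk (S.map (fun k => (k, f k))))).items
    = (PySem.Set.update S ks).map (fun k => (k, f k)) := by
  intro ks
  induction ks with
  | nil => intro S; simp [PySem.Set.update]
  | cons k ks ih =>
    intro S
    have hck : (PySem.Dict.mk (S.map (fun k => (k, f k)))).contains k
        = PySem.Set.contains S k := by
      rw [PySem.Dict.contains_mk, List.any_map, PySem.Set.contains,
          List.contains_eq_any_beq]
      simp only [Function.comp_def]
      apply PySem.List.any_congr_mem
      intro a _
      simp [eq_comm]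
    have hstep : (PySem.Dict.mk (S.map (fun k => (k, f k)))).insert k (f k)
        = PySem.Dict.mk ((PySem.Set.add S k).map (fun k => (k, f k))) := by
      apply PySem.Dict.ext
      by_cases hmem : PySem.Set.contains S k
      · rw [PySem.Dict.items_insert_of_contains _ _ (hck.trans hmem)]
        have hadd : PySem.Set.add S k = S := by
          unfold PySem.Set.add; rw [if_pos hmem]
        rw [hadd]
        show List.map _ (S.map _) = _
        rw [List.map_map]
        apply List.map_congr_left
        intro a _
        by_cases hak : a = k <;> simp [hak]
      · rw [PySem.Dict.items_insert_of_not_contains _ _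
            (hck.trans (Bool.not_eq_true _ ▸ hmem))]
        have hadd : PySem.Set.add S k = S ++ [k] := by
          unfold PySem.Set.add
          rw [if_neg hmem]
        simp [hadd]
    rw [List.foldl_cons, hstep, ih]
    rfl

-- B's result, in closed form: dedup of the length list, each paired with the
-- English word for its count
theorem alt_eq (strList : List String) :
    datacat2_alt strList
    = (PySem.Set.ofList (strList.map (fun w => PySem.Str.len w))).map
        (fun k => (k, numToEng.getD (((strList.map (fun w => PySem.Str.len w)).count k : Int)) "")) := by
  have hnn : ∀ x ∈ PySem.List.sorted (strList.map (fun w => PySem.Str.len w)) (fun x => x) false, (0 : Int) ≤ x := by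
    intro x hx
    rw [PySem.List.mem_sorted] at hx
    obtain ⟨w, _, rfl⟩ := List.mem_map.mp hx
    simp [PySem.Str.len_eq]
  have hpw : (PySem.List.sorted (strList.map (fun w => PySem.Str.len w)) (fun x => x) false).Pairwise (· ≤ ·) := by
    simpa using PySem.List.sorted_pairwise (strList.map (fun w => PySem.Str.len w)) (fun x => x)
  have hgetD : ∀ L : Int,
      (pvFlush ((PySem.List.sorted (strList.map (fun w => PySem.Str.len w)) (fun x => x) false).foldl pvStep
        (PySem.Dict.empty, 0, 0))).getD L 0 = ((strList.map (fun w => PySem.Str.len w)).count L : Int) := by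
    intro L
    rw [run_scan_getD _ hpw PySem.Dict.empty 0 0 le_rfl hnn L]
    rw [if_neg (show ¬((0 : Int) ≠ 0 ∧ L = 0) from fun h => h.1 rfl)]
    have hc : (PySem.List.sorted (strList.map (fun w => PySem.Str.len w)) (fun x => x) false).count L
        = (strList.map (fun w => PySem.Str.len w)).count L :=
      (PySem.List.sorted_perm (strList.map (fun w => PySem.Str.len w)) (fun x => x) false).count_eq L
    by_cases hm : L ∈ PySem.List.sorted (strList.map (fun w => PySem.Str.len w)) (fun x => x) false
    · rw [if_pos hm, hc]
    · rw [if_neg hm, PySem.Dict.getD_empty]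
      have h0 : (strList.map (fun w => PySem.Str.len w)).count L = 0 := by
        rw [← hc]; exact List.count_eq_zero.mpr hm
      rw [h0]; simp
  show (strList.foldl (fun d w =>
      d.insert (PySem.Str.len w)
        (numToEng.getD
          ((pvFlush ((PySem.List.sorted (strList.map (fun w => PySem.Str.len w)) (fun x => x) false).foldl pvStep
            (PySem.Dict.empty, 0, 0))).getD (PySem.Str.len w) 0) ""))
      (PySem.Dict.empty : PySem.Dict Int String)).items = _
  rw [show (strList.foldl (fun d w =>
      d.insert (PySem.Str.len w)
        (numToEng.getD
          ((pvFlush ((PySem.List.sorted (strList.map (fun w => PySem.Str.len w)) (fun x => x) false).foldl pvStep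
            (PySem.Dict.empty, 0, 0))).getD (PySem.Str.len w) 0) ""))
      (PySem.Dict.empty : PySem.Dict Int String))
    = ((strList.map (fun w => PySem.Str.len w)).foldl (fun d k =>
        d.insert k
          (numToEng.getD
            ((pvFlush ((PySem.List.sorted (strList.map (fun w => PySem.Str.len w)) (fun x => x) false).foldl pvStep
              (PySem.Dict.empty, 0, 0))).getD k 0) ""))
        (PySem.Dict.empty : PySem.Dict Int String)) from (List.foldl_map
        (f := fun w => PySem.Str.len w)
        (g := fun (d : PySem.Dict Int String) k =>
          d.insert k
            (numToEng.getD
              ((pvFlush ((PySem.List.sorted (strList.map (fun w => PySem.Str.len w)) (fun x => x) false).foldl pvStep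
                (PySem.Dict.empty, 0, 0))).getD k 0) ""))
        (l := strList)
        (init := (PySem.Dict.empty : PySem.Dict Int String))).symm]
  have h2 := items_foldl_insert_fun
    (fun k => numToEng.getD
      ((pvFlush ((PySem.List.sorted (strList.map (fun w => PySem.Str.len w)) (fun x => x) false).foldl pvStep
        (PySem.Dict.empty, 0, 0))).getD k 0) "")
    (strList.map (fun w => PySem.Str.len w)) []
  rw [show (PySem.Dict.empty : PySem.Dict Int String)
      = PySem.Dict.mk (([] : List Int).map (fun k => (k, numToEng.getD
          ((pvFlush ((PySem.List.sorted (strList.map (fun w => PySem.Str.len w)) (fun x => x) false).foldl pvStep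
            (PySem.Dict.empty, 0, 0))).getD k 0) ""))) from rfl]
  rw [h2]
  rw [show PySem.Set.update ([] : List Int) (strList.map (fun w => PySem.Str.len w))
      = PySem.Set.ofList (strList.map (fun w => PySem.Str.len w)) from rfl]
  apply List.map_congr_left
  intro k _
  rw [hgetD k]

-- A's result, in the same closed form
theorem a_eq (strList : List String) :
    datacat2 strList
    = (PySem.Set.ofList (strList.map (fun w => PySem.Str.len w))).map
        (fun k => (k, numToEng.getD (((strList.map (fun w => PySem.Str.len w)).count k : Int)) "")) := by
  unfold datacat2
  rw [datacat2_fold_eq_counter, PySem.Dict.items_counter, List.map_map]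
  rfl

-- ===== VERDICT (by name: the statement is the Claim_ definition above) =====
theorem datacat2_spec : Claim_equal_datacat2 := by
  intro strList _ _
  unfold Spec_datacat2
  rw [a_eq, alt_eq]
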